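-- pv_equiv track=rewrite | github.com/bsubercaseaux/rubik-hamiltonian | build_floppy.py | build_facelets
-- ===== SOURCE A (Python) =====
-- def build_facelets(nx, ny, nz):
--     """
--     Facelet is identified by (cubie_position, outward_normal).
--     cubie_position = (x,y,z) with x in [0..nx-1], etc.
--     outward_normal in {±x, ±y, ±z}.
--     """
--     facelets = []
--     for x in range(nx):
--         for y in range(ny):
--             for z in range(nz):
--                 if x == 0:      facelets.append(((x, y, z), (-1, 0, 0)))
--                 if x == nx - 1: facelets.append(((x, y, z), ( 1, 0, 0)))
--                 if y == 0:      facelets.append(((x, y, z), (0, -1, 0)))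
--                 if y == ny - 1: facelets.append(((x, y, z), (0,  1, 0)))
--                 if z == 0:      facelets.append(((x, y, z), (0, 0, -1)))
--                 if z == nz - 1: facelets.append(((x, y, z), (0, 0,  1)))
--     return facelets
-- ===== SOURCE B (Python) =====
-- def build_facelets(nx, ny, nz):
--     """Same facelets as A, but the z-loop only visits z=0 and z=nz-1 for
--     cubies interior in x and y: O(nx*ny + ny*nz + nx*nz) work instead of O(nx*ny*nz)."""
--     def cell(x, y, z):
--         fs = []
--         if x == 0:      fs.append(((x, y, z), (-1, 0, 0)))
--         if x == nx - 1: fs.append(((x, y, z), ( 1, 0, 0)))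
--         if y == 0:      fs.append(((x, y, z), (0, -1, 0)))
--         if y == ny - 1: fs.append(((x, y, z), (0,  1, 0)))
--         if z == 0:      fs.append(((x, y, z), (0, 0, -1)))
--         if z == nz - 1: fs.append(((x, y, z), (0, 0,  1)))
--         return fs
--     if nz <= 0:
--         z_boundary = []
--     elif nz == 1:
--         z_boundary = [0]
--     else:
--         z_boundary = [0, nz - 1]
--     facelets = []
--     for x in range(nx):
--         x_on_boundary = (x == 0 or x == nx - 1)
--         for y in range(ny):
--             if x_on_boundary or y == 0 or y == ny - 1:
--                 zs = range(nz)
--             else: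
--                 zs = z_boundary
--             for z in zs:
--                 facelets.extend(cell(x, y, z))
--     return facelets
-- ===== Notes on version B (the rewrite author's own statement) =====
-- stated objective: faster
-- what changed: B skips the interior of each z-column: for cubies interior in x and y it visits only z=0 and z=nz-1 instead of all nz values, emitting the same facelets in the same order.
import Mathlib
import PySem

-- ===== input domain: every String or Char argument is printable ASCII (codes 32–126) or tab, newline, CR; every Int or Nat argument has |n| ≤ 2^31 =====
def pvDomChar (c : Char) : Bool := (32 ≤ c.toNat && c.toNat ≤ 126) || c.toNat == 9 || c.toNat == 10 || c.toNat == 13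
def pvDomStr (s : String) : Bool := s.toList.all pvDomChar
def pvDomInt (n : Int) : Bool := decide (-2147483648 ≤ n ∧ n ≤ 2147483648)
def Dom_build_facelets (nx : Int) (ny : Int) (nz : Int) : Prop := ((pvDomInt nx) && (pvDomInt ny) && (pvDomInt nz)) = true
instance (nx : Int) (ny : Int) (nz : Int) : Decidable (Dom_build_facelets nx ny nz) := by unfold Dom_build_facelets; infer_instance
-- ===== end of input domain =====

-- B enumerates the same facelets in the same order but skips interior z-values for cubies
-- interior in x and y (objective: faster, asymptotically fewer loop iterations).

-- ===== PORT A =====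
def build_facelets (nx : Int) (ny : Int) (nz : Int) : List (List Int × List Int) :=
  (PySem.List.pyRange 0 nx 1).foldl (fun facelets x =>
    (PySem.List.pyRange 0 ny 1).foldl (fun facelets y =>
      (PySem.List.pyRange 0 nz 1).foldl (fun facelets z =>
        let facelets := if x = 0 then facelets ++ [([x, y, z], ([-1, 0, 0] : List Int))] else facelets
        let facelets := if x = nx - 1 then facelets ++ [([x, y, z], [1, 0, 0])] else facelets
        let facelets := if y = 0 then facelets ++ [([x, y, z], [0, -1, 0])] else facelets
        let facelets := if y = ny - 1 then facelets ++ [([x, y, z], [0, 1, 0])] else facelets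
        let facelets := if z = 0 then facelets ++ [([x, y, z], [0, 0, -1])] else facelets
        if z = nz - 1 then facelets ++ [([x, y, z], [0, 0, 1])] else facelets
      ) facelets) facelets) []

-- ===== PORT B =====
-- helper `cell` of Source B: the facelets of one cubie
def pvCell (nx : Int) (ny : Int) (nz : Int) (x : Int) (y : Int) (z : Int) : List (List Int × List Int) :=
  (if x = 0 then [([x, y, z], ([-1, 0, 0] : List Int))] else []) ++
  (if x = nx - 1 then [([x, y, z], [1, 0, 0])] else []) ++
  (if y = 0 then [([x, y, z], [0, -1, 0])] else []) ++
  (if y = ny - 1 then [([x, y, z], [0, 1, 0])] else []) ++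
  (if z = 0 then [([x, y, z], [0, 0, -1])] else []) ++
  (if z = nz - 1 then [([x, y, z], [0, 0, 1])] else [])

-- Source B's z_boundary list
def pvZBoundary (nz : Int) : List Int :=
  if nz ≤ 0 then [] else if nz = 1 then [0] else [0, nz - 1]

def build_facelets_alt (nx : Int) (ny : Int) (nz : Int) : List (List Int × List Int) :=
  (PySem.List.pyRange 0 nx 1).foldl (fun facelets x =>
    (PySem.List.pyRange 0 ny 1).foldl (fun facelets y =>
      (if x = 0 ∨ x = nx - 1 ∨ y = 0 ∨ y = ny - 1 then PySem.List.pyRange 0 nz 1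
       else pvZBoundary nz).foldl
        (fun facelets z => facelets ++ pvCell nx ny nz x y z) facelets) facelets) []

-- ===== PRECONDITION & SPEC =====
def Spec_build_facelets (nx : Int) (ny : Int) (nz : Int) (out : List (List Int × List Int)) : Prop := out = build_facelets_alt nx ny nz
instance (nx : Int) (ny : Int) (nz : Int) (out : List (List Int × List Int)) : Decidable (Spec_build_facelets nx ny nz out) := by unfold Spec_build_facelets; infer_instance

-- ===== CLAIM (what is proved, stated in full; the proofs are below) =====
def Claim_equal_build_facelets : Prop := ∀ (nx : Int) (ny : Int) (nz : Int), Dom_build_facelets nx ny nz → Spec_build_facelets nx ny nz (build_facelets nx ny nz)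

-- ===== LEMMAS AND PROOFS =====

-- A's six sequential conditional appends are one append of pvCell
lemma pvA_inner (nx ny nz x y : Int) (zs : List Int) (acc : List (List Int × List Int)) :
    zs.foldl (fun facelets z =>
        let facelets := if x = 0 then facelets ++ [([x, y, z], ([-1, 0, 0] : List Int))] else facelets
        let facelets := if x = nx - 1 then facelets ++ [([x, y, z], [1, 0, 0])] else facelets
        let facelets := if y = 0 then facelets ++ [([x, y, z], [0, -1, 0])] else facelets
        let facelets := if y = ny - 1 then facelets ++ [([x, y, z], [0, 1, 0])] else facelets
        let facelets := if z = 0 then facelets ++ [([x, y, z], [0, 0, -1])] else facelets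
        if z = nz - 1 then facelets ++ [([x, y, z], [0, 0, 1])] else facelets) acc
      = acc ++ zs.flatMap (pvCell nx ny nz x y) := by
  have h : (fun (facelets : List (List Int × List Int)) (z : Int) =>
        let facelets := if x = 0 then facelets ++ [([x, y, z], ([-1, 0, 0] : List Int))] else facelets
        let facelets := if x = nx - 1 then facelets ++ [([x, y, z], [1, 0, 0])] else facelets
        let facelets := if y = 0 then facelets ++ [([x, y, z], [0, -1, 0])] else facelets
        let facelets := if y = ny - 1 then facelets ++ [([x, y, z], [0, 1, 0])] else facelets
        let facelets := if z = 0 then facelets ++ [([x, y, z], [0, 0, -1])] else facelets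
        if z = nz - 1 then facelets ++ [([x, y, z], [0, 0, 1])] else facelets)
      = fun facelets z => facelets ++ pvCell nx ny nz x y z := by
    funext facelets z
    simp only [pvCell]
    split_ifs <;> simp
  rw [h, PySem.List.foldl_append_eq_flatMap]

-- A as a triple flatMap
lemma pvA_flatMap (nx ny nz : Int) :
    build_facelets nx ny nz
      = (PySem.List.pyRange 0 nx 1).flatMap (fun x =>
          (PySem.List.pyRange 0 ny 1).flatMap (fun y =>
            (PySem.List.pyRange 0 nz 1).flatMap (pvCell nx ny nz x y))) := by
  unfold build_facelets
  have hy : ∀ x (acc : List (List Int × List Int)),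
      (PySem.List.pyRange 0 ny 1).foldl (fun facelets y =>
        (PySem.List.pyRange 0 nz 1).foldl (fun facelets z =>
          let facelets := if x = 0 then facelets ++ [([x, y, z], ([-1, 0, 0] : List Int))] else facelets
          let facelets := if x = nx - 1 then facelets ++ [([x, y, z], [1, 0, 0])] else facelets
          let facelets := if y = 0 then facelets ++ [([x, y, z], [0, -1, 0])] else facelets
          let facelets := if y = ny - 1 then facelets ++ [([x, y, z], [0, 1, 0])] else facelets
          let facelets := if z = 0 then facelets ++ [([x, y, z], [0, 0, -1])] else facelets
          if z = nz - 1 then facelets ++ [([x, y, z], [0, 0, 1])] else facelets) facelets) acc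
      = acc ++ (PySem.List.pyRange 0 ny 1).flatMap (fun y =>
          (PySem.List.pyRange 0 nz 1).flatMap (pvCell nx ny nz x y)) := by
    intro x acc
    have h : (fun (facelets : List (List Int × List Int)) (y : Int) =>
        (PySem.List.pyRange 0 nz 1).foldl (fun facelets z =>
          let facelets := if x = 0 then facelets ++ [([x, y, z], ([-1, 0, 0] : List Int))] else facelets
          let facelets := if x = nx - 1 then facelets ++ [([x, y, z], [1, 0, 0])] else facelets
          let facelets := if y = 0 then facelets ++ [([x, y, z], [0, -1, 0])] else facelets
          let facelets := if y = ny - 1 then facelets ++ [([x, y, z], [0, 1, 0])] else facelets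
          let facelets := if z = 0 then facelets ++ [([x, y, z], [0, 0, -1])] else facelets
          if z = nz - 1 then facelets ++ [([x, y, z], [0, 0, 1])] else facelets) facelets)
        = fun facelets y => facelets ++ (PySem.List.pyRange 0 nz 1).flatMap (pvCell nx ny nz x y) := by
      funext facelets y
      exact pvA_inner nx ny nz x y _ facelets
    rw [h, PySem.List.foldl_append_eq_flatMap]
  have h : (fun (facelets : List (List Int × List Int)) (x : Int) =>
      (PySem.List.pyRange 0 ny 1).foldl (fun facelets y =>
        (PySem.List.pyRange 0 nz 1).foldl (fun facelets z =>
          let facelets := if x = 0 then facelets ++ [([x, y, z], ([-1, 0, 0] : List Int))] else facelets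
          let facelets := if x = nx - 1 then facelets ++ [([x, y, z], [1, 0, 0])] else facelets
          let facelets := if y = 0 then facelets ++ [([x, y, z], [0, -1, 0])] else facelets
          let facelets := if y = ny - 1 then facelets ++ [([x, y, z], [0, 1, 0])] else facelets
          let facelets := if z = 0 then facelets ++ [([x, y, z], [0, 0, -1])] else facelets
          if z = nz - 1 then facelets ++ [([x, y, z], [0, 0, 1])] else facelets) facelets) facelets)
      = fun facelets x => facelets ++ (PySem.List.pyRange 0 ny 1).flatMap (fun y =>
          (PySem.List.pyRange 0 nz 1).flatMap (pvCell nx ny nz x y)) := by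
    funext facelets x
    exact hy x facelets
  rw [h, PySem.List.foldl_append_eq_flatMap, List.nil_append]

-- B as a triple flatMap
lemma pvB_flatMap (nx ny nz : Int) :
    build_facelets_alt nx ny nz
      = (PySem.List.pyRange 0 nx 1).flatMap (fun x =>
          (PySem.List.pyRange 0 ny 1).flatMap (fun y =>
            (if x = 0 ∨ x = nx - 1 ∨ y = 0 ∨ y = ny - 1 then PySem.List.pyRange 0 nz 1
             else pvZBoundary nz).flatMap (pvCell nx ny nz x y))) := by
  unfold build_facelets_alt
  have hy : ∀ x (acc : List (List Int × List Int)),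
      (PySem.List.pyRange 0 ny 1).foldl (fun facelets y =>
        (if x = 0 ∨ x = nx - 1 ∨ y = 0 ∨ y = ny - 1 then PySem.List.pyRange 0 nz 1
         else pvZBoundary nz).foldl (fun facelets z => facelets ++ pvCell nx ny nz x y z) facelets) acc
      = acc ++ (PySem.List.pyRange 0 ny 1).flatMap (fun y =>
          (if x = 0 ∨ x = nx - 1 ∨ y = 0 ∨ y = ny - 1 then PySem.List.pyRange 0 nz 1
           else pvZBoundary nz).flatMap (pvCell nx ny nz x y)) := by
    intro x acc
    have h : (fun (facelets : List (List Int × List Int)) (y : Int) =>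
        (if x = 0 ∨ x = nx - 1 ∨ y = 0 ∨ y = ny - 1 then PySem.List.pyRange 0 nz 1
         else pvZBoundary nz).foldl (fun facelets z => facelets ++ pvCell nx ny nz x y z) facelets)
        = fun facelets y => facelets ++ (if x = 0 ∨ x = nx - 1 ∨ y = 0 ∨ y = ny - 1 then PySem.List.pyRange 0 nz 1
           else pvZBoundary nz).flatMap (pvCell nx ny nz x y) := by
      funext facelets y
      rw [PySem.List.foldl_append_eq_flatMap]
    rw [h, PySem.List.foldl_append_eq_flatMap]
  have h : (fun (facelets : List (List Int × List Int)) (x : Int) =>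
      (PySem.List.pyRange 0 ny 1).foldl (fun facelets y =>
        (if x = 0 ∨ x = nx - 1 ∨ y = 0 ∨ y = ny - 1 then PySem.List.pyRange 0 nz 1
         else pvZBoundary nz).foldl (fun facelets z => facelets ++ pvCell nx ny nz x y z) facelets) facelets)
      = fun facelets x => facelets ++ (PySem.List.pyRange 0 ny 1).flatMap (fun y =>
          (if x = 0 ∨ x = nx - 1 ∨ y = 0 ∨ y = ny - 1 then PySem.List.pyRange 0 nz 1
           else pvZBoundary nz).flatMap (pvCell nx ny nz x y)) := by
    funext facelets x
    exact hy x facelets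
  rw [h, PySem.List.foldl_append_eq_flatMap, List.nil_append]

-- for a cubie interior in x and y, only z = 0 and z = nz-1 contribute
lemma pvZ_skip (nx ny nz x y : Int) (hx0 : x ≠ 0) (hx1 : x ≠ nx - 1)
    (hy0 : y ≠ 0) (hy1 : y ≠ ny - 1) :
    (PySem.List.pyRange 0 nz 1).flatMap (pvCell nx ny nz x y)
      = (pvZBoundary nz).flatMap (pvCell nx ny nz x y) := by
  have hcell : ∀ z, pvCell nx ny nz x y z
      = (if z = 0 then [(([x, y, z] : List Int), ([0, 0, -1] : List Int))] else []) ++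
        (if z = nz - 1 then [(([x, y, z] : List Int), ([0, 0, 1] : List Int))] else []) := by
    intro z
    simp [pvCell, hx0, hx1, hy0, hy1]
  by_cases h0 : nz ≤ 0
  · rw [PySem.List.pyRange_one_eq_nil (by omega)]
    simp [pvZBoundary, h0]
  · by_cases h1 : nz = 1
    · subst h1
      rw [show PySem.List.pyRange 0 1 1 = [0] from by
        rw [PySem.List.pyRange_one_cons (by omega), PySem.List.pyRange_one_eq_nil (by omega)]]
      simp [pvZBoundary]
    · -- nz ≥ 2
      have h2 : 2 ≤ nz := by omega
      rw [PySem.List.pyRange_one_append 0 1 nz (by omega) (by omega),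
          PySem.List.pyRange_one_append 1 (nz - 1) nz (by omega) (by omega)]
      have hz0 : PySem.List.pyRange 0 1 1 = [0] := by
        rw [PySem.List.pyRange_one_cons (by omega), PySem.List.pyRange_one_eq_nil (by omega)]
      have hz1 : PySem.List.pyRange (nz - 1) nz 1 = [nz - 1] := by
        rw [PySem.List.pyRange_one_cons (by omega), PySem.List.pyRange_one_eq_nil (by omega)]
      have hmid : (PySem.List.pyRange 1 (nz - 1) 1).flatMap (pvCell nx ny nz x y) = [] := by
        rw [List.flatMap_eq_nil_iff]
        intro z hz
        rw [PySem.List.mem_pyRange_one] at hz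
        rw [hcell z, if_neg (by omega), if_neg (by omega)]
        rfl
      rw [hz0, hz1, List.flatMap_append, List.flatMap_append, hmid]
      simp [pvZBoundary, h0, h1]

-- ===== VERDICT (by name: the statement is the Claim_ definition above) =====
theorem build_facelets_spec : Claim_equal_build_facelets := by
  intro nx ny nz _
  show build_facelets nx ny nz = build_facelets_alt nx ny nz
  rw [pvA_flatMap, pvB_flatMap]
  refine List.flatMap_congr (fun x hx => ?_)
  refine List.flatMap_congr (fun y hy => ?_)
  by_cases h : x = 0 ∨ x = nx - 1 ∨ y = 0 ∨ y = ny - 1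
  · rw [if_pos h]
  · rw [if_neg h]
    push Not at h
    exact pvZ_skip nx ny nz x y h.1 h.2.1 h.2.2.1 h.2.2.2
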